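-- pv_equiv track=rewrite | github.com/yambo-code/aiida-yambo | aiida_yambo/workflows/yambowf.py | QP_list_merger
-- ===== SOURCE A (Python) =====
-- def QP_list_merger(l=[],qp_per_subset=10,consider_only=[-1]):
--
--     subgroup = []
--     groups = []
--     for qp_set in l:
--         for k in list(range(qp_set[0],qp_set[1]+1)):
--             for b in list(range(qp_set[2],qp_set[3]+1)):
--
--                 if (b in consider_only) or (consider_only[0]==-1):
--                     subgroup.append([k,k,b,b])
--                     if len(subgroup)==qp_per_subset:
--                         groups.append(subgroup)
--                         subgroup=[]
--
--     if len(subgroup)<=qp_per_subset and len(subgroup)>0: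
--         groups.append(subgroup)
--
--     return groups
-- ===== SOURCE B (Python) =====
-- def QP_list_merger(l=[], qp_per_subset=10, consider_only=[-1]):
--     flat = [[k, k, b, b]
--             for qp_set in l
--             for k in range(qp_set[0], qp_set[1] + 1)
--             for b in range(qp_set[2], qp_set[3] + 1)
--             if b in consider_only or consider_only[0] == -1]
--     return [flat[i:i + qp_per_subset] for i in range(0, len(flat), qp_per_subset)]
-- ===== Notes on version B (the rewrite author's own statement) =====
-- stated objective: simpler
-- what changed: B separates enumeration from grouping: it builds one flat comprehension of qualifying [k,k,b,b] entries and then chunks it by slicing with a stride-qp_per_subset range, replacing A's running subgroup counter with manual flush.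
-- outside the precondition, e.g. on QP_list_merger([[1, 1, 1, 1]], 0, [-1]): A returns [], B raises ValueError
import Mathlib
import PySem

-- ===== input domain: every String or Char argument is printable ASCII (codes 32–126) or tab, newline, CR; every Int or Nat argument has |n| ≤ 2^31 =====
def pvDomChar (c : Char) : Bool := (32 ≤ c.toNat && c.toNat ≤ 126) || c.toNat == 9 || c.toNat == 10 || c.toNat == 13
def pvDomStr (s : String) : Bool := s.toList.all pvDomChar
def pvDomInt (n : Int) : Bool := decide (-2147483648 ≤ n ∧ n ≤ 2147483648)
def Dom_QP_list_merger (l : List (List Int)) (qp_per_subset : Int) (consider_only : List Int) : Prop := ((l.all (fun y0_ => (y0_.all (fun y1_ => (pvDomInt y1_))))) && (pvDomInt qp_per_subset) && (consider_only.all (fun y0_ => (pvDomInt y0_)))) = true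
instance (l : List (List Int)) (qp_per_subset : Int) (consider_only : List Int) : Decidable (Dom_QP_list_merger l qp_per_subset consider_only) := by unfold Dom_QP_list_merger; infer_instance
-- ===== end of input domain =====

-- ===== PORT A =====
-- B decouples enumeration from grouping (flat comprehension, then stride-slicing) instead of
-- A's running subgroup counter with manual flush; objective: simpler. Return-value equivalence only.
-- A, literal: nested loops with state (subgroup, groups); qp_set[0..3] via getD (in range under
-- Pre_), consider_only[0] via headI (consider_only nonempty whenever reached, under Pre_).
def QP_list_merger (l : List (List Int)) (qp_per_subset : Int) (consider_only : List Int) : List (List (List Int)) :=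
  let st := l.foldl (fun st qp_set =>
    (PySem.List.pyRange (qp_set.getD 0 0) (qp_set.getD 1 0 + 1) 1).foldl (fun st k =>
      (PySem.List.pyRange (qp_set.getD 2 0) (qp_set.getD 3 0 + 1) 1).foldl (fun st b =>
        if b ∈ consider_only ∨ consider_only.headI = -1 then
          let subgroup := st.1 ++ [[k, k, b, b]]
          if (subgroup.length : Int) = qp_per_subset then ([], st.2 ++ [subgroup])
          else (subgroup, st.2)
        else st) st) st) (([] : List (List Int)), ([] : List (List (List Int))))
  if (st.1.length : Int) ≤ qp_per_subset ∧ 0 < st.1.length then st.2 ++ [st.1] else st.2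

-- ===== PORT B =====
-- B, literal: the flat comprehension (flatMap/filter/map), then the slicing comprehension.
def QP_list_merger_alt (l : List (List Int)) (qp_per_subset : Int) (consider_only : List Int) : List (List (List Int)) :=
  let flat := l.flatMap (fun qp_set =>
    (PySem.List.pyRange (qp_set.getD 0 0) (qp_set.getD 1 0 + 1) 1).flatMap (fun k =>
      ((PySem.List.pyRange (qp_set.getD 2 0) (qp_set.getD 3 0 + 1) 1).filter
          (fun b => decide (b ∈ consider_only) || decide (consider_only.headI = -1))).map
        (fun b => [k, k, b, b])))
  (PySem.List.pyRange 0 (flat.length : Int) qp_per_subset).map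
    (fun i => PySem.List.slice flat (some i) (some (i + qp_per_subset)))

-- ===== PRECONDITION & SPEC =====
-- Pre_ excludes exactly the inputs on which a Python raises: A raises IndexError when some qp_set is
-- too short for the subscripts it actually reaches, or when consider_only is empty and some (k,b)
-- pair is reached; and qp_per_subset = 0 is excluded because B's range step of 0 raises ValueError
-- there (A returns [] on it, dropping everything).
def Pre_QP_list_merger (l : List (List Int)) (qp_per_subset : Int) (consider_only : List Int) : Prop :=
  qp_per_subset ≠ 0 ∧
  (∀ qs ∈ l, 2 ≤ qs.length ∧ (qs.getD 0 0 ≤ qs.getD 1 0 → 4 ≤ qs.length)) ∧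
  (consider_only ≠ [] ∨ ∀ qs ∈ l, ¬(qs.getD 0 0 ≤ qs.getD 1 0 ∧ qs.getD 2 0 ≤ qs.getD 3 0))
instance (l : List (List Int)) (qp_per_subset : Int) (consider_only : List Int) : Decidable (Pre_QP_list_merger l qp_per_subset consider_only) := by unfold Pre_QP_list_merger; infer_instance
def pvWitness_QP_list_merger : List (List Int) × Int × List Int := ([[1, 2, 1, 2]], 2, [-1])

def Spec_QP_list_merger (l : List (List Int)) (qp_per_subset : Int) (consider_only : List Int) (out : List (List (List Int))) : Prop := out = QP_list_merger_alt l qp_per_subset consider_only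
instance (l : List (List Int)) (qp_per_subset : Int) (consider_only : List Int) (out : List (List (List Int))) : Decidable (Spec_QP_list_merger l qp_per_subset consider_only out) := by unfold Spec_QP_list_merger; infer_instance

-- ===== CLAIM (what is proved, stated in full; the proofs are below) =====
def Claim_equal_QP_list_merger : Prop := ∀ (l : List (List Int)) (qp_per_subset : Int) (consider_only : List Int), Dom_QP_list_merger l qp_per_subset consider_only → Pre_QP_list_merger l qp_per_subset consider_only → Spec_QP_list_merger l qp_per_subset consider_only (QP_list_merger l qp_per_subset consider_only)

-- ===== LEMMAS AND PROOFS =====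

-- A's per-entry step on the running (subgroup, groups) state.
def pvPush (qp : Int) (st : List (List Int) × List (List (List Int))) (e : List Int) :
    List (List Int) × List (List (List Int)) :=
  let subgroup := st.1 ++ [e]
  if (subgroup.length : Int) = qp then ([], st.2 ++ [subgroup]) else (subgroup, st.2)

-- reference chunking: groups of q, last one possibly short
def pvChunk {alpha : Type} (q : Nat) : List alpha → List (List alpha)
  | [] => []
  | x :: xs => (x :: xs).take q :: pvChunk q (xs.drop (q - 1))
  termination_by xs => xs.length
  decreasing_by simp

lemma pvChunk_unfold {alpha : Type} (q : Nat) (hq : 1 ≤ q) (ys : List alpha) (h : ys ≠ []) :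
    pvChunk q ys = ys.take q :: pvChunk q (ys.drop q) := by
  cases ys with
  | nil => exact absurd rfl h
  | cons x xs =>
    have : xs.drop (q - 1) = (x :: xs).drop q := by
      obtain ⟨q', rfl⟩ : ∃ q', q = q' + 1 := ⟨q - 1, by omega⟩
      simp
    rw [pvChunk, this]


lemma foldl_push_const (qp : Int) (hqp : qp < 0) (xs : List (List Int)) :
    ∀ (sub : List (List Int)) (groups : List (List (List Int))),
      xs.foldl (pvPush qp) (sub, groups) = (sub ++ xs, groups) := by
  induction xs with
  | nil => simp
  | cons x xs ih =>
    intro sub groups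
    have h : ¬ (((sub ++ [x]).length : Int) = qp) := by
      simp only [List.length_append, List.length_cons, List.length_nil]
      push_cast; omega
    simp only [List.foldl_cons, pvPush, h, ih]
    simp

lemma foldl_push_chunk (qp : Int) (hq : 1 ≤ qp) (xs : List (List Int)) :
    ∀ (sub : List (List Int)) (groups : List (List (List Int))),
      (sub.length : Int) < qp →
      (if ((xs.foldl (pvPush qp) (sub, groups)).1.length : Int) ≤ qp ∧
          0 < (xs.foldl (pvPush qp) (sub, groups)).1.length
        then (xs.foldl (pvPush qp) (sub, groups)).2 ++ [(xs.foldl (pvPush qp) (sub, groups)).1]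
        else (xs.foldl (pvPush qp) (sub, groups)).2)
        = groups ++ pvChunk qp.toNat (sub ++ xs) := by
  induction xs with
  | nil =>
    intro sub groups hsub
    cases sub with
    | nil => simp only [List.foldl_nil, List.append_nil]; rw [pvChunk]; simp
    | cons y ys =>
      have h1 : ((y :: ys).length : Int) ≤ qp := le_of_lt hsub
      have h2 : 0 < (y :: ys).length := by simp
      simp only [List.foldl_nil, List.append_nil]
      rw [if_pos ⟨h1, h2⟩, pvChunk]
      have hy : ys.length + 1 < qp.toNat := by
        have := hsub; simp only [List.length_cons] at this ⊢; push_cast at this; omega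
      rw [List.take_of_length_le (by simp; omega), List.drop_eq_nil_of_le (by omega), pvChunk]
  | cons x xs ih =>
    intro sub groups hsub
    simp only [List.foldl_cons]
    by_cases h : (((sub ++ [x]).length : Int) = qp)
    · have hpush : pvPush qp (sub, groups) x = ([], groups ++ [sub ++ [x]]) := by
        simp only [pvPush]; rw [if_pos h]
      rw [hpush, ih [] (groups ++ [sub ++ [x]]) (by simp; omega)]
      have hlen : (sub ++ [x]).length = qp.toNat := by
        simp only [List.length_append, List.length_cons, List.length_nil] at h ⊢; omega
      have hcons : sub ++ x :: xs = (sub ++ [x]) ++ xs := by simp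
      rw [hcons, pvChunk_unfold qp.toNat (by omega) ((sub ++ [x]) ++ xs) (by simp),
        List.take_left' hlen, List.drop_left' hlen]
      simp
    · have hpush : pvPush qp (sub, groups) x = (sub ++ [x], groups) := by
        simp only [pvPush]; rw [if_neg h]
      rw [hpush, ih (sub ++ [x]) groups (by simp at h ⊢; omega)]
      simp

-- one cons-step of a positive-stride range starting at 0
lemma pyRange_pos_cons (q n : Int) (hq : 1 ≤ q) (hn : 0 < n) :
    PySem.List.pyRange 0 n q = 0 :: (PySem.List.pyRange 0 (n - q) q).map (· + q) := by
  have hq0 : (0 : Int) < q := by omega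
  have hqne : q ≠ 0 := by omega
  rw [PySem.List.pyRange_of_pos _ _ hq0, PySem.List.pyRange_of_pos _ _ hq0]
  have hm0 : 0 ≤ (n - 1) / q := Int.ediv_nonneg (by omega) (by omega)
  have hcount : (n - 0 + q - 1) / q = (n - 1) / q + 1 := by
    have : n - 0 + q - 1 = (n - 1) + 1 * q := by ring
    rw [this, Int.add_mul_ediv_right _ _ hqne]
  have hcount' : (if (0:Int) < n - q then ((n - q - 0 + q - 1) / q).toNat else 0) = ((n - 1) / q).toNat := by
    by_cases hc : (0:Int) < n - q
    · rw [if_pos hc]; congr 1; congr 1; ring_nf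
    · rw [if_neg hc]
      have : (n - 1) / q = 0 := Int.ediv_eq_zero_of_lt (by omega) (by omega)
      omega
  rw [if_pos hn, hcount, hcount']
  have : ((n - 1) / q + 1).toNat = ((n - 1) / q).toNat + 1 := by omega
  rw [this, List.range_succ_eq_map]
  simp only [List.map_cons, List.map_map]
  congr 1
  · norm_num
  · apply List.map_congr_left
    intro k _
    simp only [Function.comp_apply, Nat.succ_eq_add_one]
    push_cast; ring

lemma pyRange_nonpos (q n : Int) (hn : 0 ≤ n) (hq : q < 0) :
    PySem.List.pyRange 0 n q = [] := by
  simp only [PySem.List.pyRange]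
  rw [if_neg (by omega : ¬ q = 0)]
  rw [if_neg (by omega : ¬ (0:Int) < q), if_neg (by omega : ¬ n < 0)]
  simp

lemma map_slice_chunk (qp : Int) (hq : 1 ≤ qp) :
    ∀ (N : Nat) (flat : List (List Int)), flat.length ≤ N →
      (PySem.List.pyRange 0 (flat.length : Int) qp).map
          (fun i => PySem.List.slice flat (some i) (some (i + qp)))
        = pvChunk qp.toNat flat := by
  intro N
  induction N with
  | zero =>
    intro flat hflat
    have : flat = [] := List.length_eq_zero_iff.mp (by omega)
    subst this
    rw [PySem.List.pyRange_of_pos _ _ (by omega), pvChunk]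
    simp
  | succ N ih =>
    intro flat hflat
    cases flat with
    | nil =>
      rw [PySem.List.pyRange_of_pos _ _ (by omega), pvChunk]
      simp
    | cons x xs =>
      set f := x :: xs with hf
      have hlen : (0 : Int) < (f.length : Int) := by simp [hf]
      rw [pyRange_pos_cons qp _ hq hlen]
      simp only [List.map_cons, List.map_map]
      have hhead : PySem.List.slice f (some 0) (some (0 + qp)) = f.take qp.toNat := by
        rw [zero_add, PySem.List.slice_toNat _ le_rfl (by omega)]
        simp
      have htail : ∀ i ∈ PySem.List.pyRange 0 ((f.length : Int) - qp) qp,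
          PySem.List.slice f (some (i + qp)) (some (i + qp + qp))
            = PySem.List.slice (f.drop qp.toNat) (some i) (some (i + qp)) := by
        intro i hi
        have hi0 : 0 ≤ i := ((PySem.List.mem_pyRange_iff_of_pos (by omega) i).mp hi).1
        rw [PySem.List.slice_toNat _ (by omega) (by omega),
          PySem.List.slice_toNat _ hi0 (by omega)]
        have e1 : (i + qp).toNat = qp.toNat + i.toNat := by omega
        have e2 : (i + qp + qp).toNat - (i + qp).toNat = (i + qp).toNat - i.toNat := by omega
        rw [e2, e1, List.drop_drop]
      have hrange : PySem.List.pyRange 0 ((f.length : Int) - qp) qp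
          = PySem.List.pyRange 0 (((f.drop qp.toNat).length : Int)) qp := by
        by_cases hc : qp < (f.length : Int)
        · congr 1
          simp only [List.length_drop]
          omega
        · rw [PySem.List.pyRange_of_pos _ _ (by omega), PySem.List.pyRange_of_pos _ _ (by omega)]
          have h1 : ¬ ((0:Int) < (f.length : Int) - qp) := by omega
          have h2 : (f.drop qp.toNat) = [] := List.drop_eq_nil_of_le (by omega)
          rw [if_neg h1, h2]
          simp
      calc (PySem.List.slice f (some 0) (some (0 + qp))) ::
            (PySem.List.pyRange 0 ((f.length : Int) - qp) qp).map
              ((fun i => PySem.List.slice f (some i) (some (i + qp))) ∘ (· + qp))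
          = f.take qp.toNat ::
            (PySem.List.pyRange 0 (((f.drop qp.toNat).length : Int)) qp).map
              (fun i => PySem.List.slice (f.drop qp.toNat) (some i) (some (i + qp))) := by
            rw [hhead, ← hrange]
            congr 1
            exact List.map_congr_left htail
        _ = f.take qp.toNat :: pvChunk qp.toNat (f.drop qp.toNat) := by
            rw [ih (f.drop qp.toNat) (by simp [hf] at hflat ⊢; omega)]
        _ = pvChunk qp.toNat f := by
            rw [pvChunk_unfold qp.toNat (by omega) f (by simp [hf])]

-- A's nested fold over l is the fold of pvPush over B's flat list.
lemma fold_eq_fold_flat (l : List (List Int)) (qp : Int) (co : List Int)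
    (st : List (List Int) × List (List (List Int))) :
    l.foldl (fun st qp_set =>
      (PySem.List.pyRange (qp_set.getD 0 0) (qp_set.getD 1 0 + 1) 1).foldl (fun st k =>
        (PySem.List.pyRange (qp_set.getD 2 0) (qp_set.getD 3 0 + 1) 1).foldl (fun st b =>
          if b ∈ co ∨ co.headI = -1 then
            let subgroup := st.1 ++ [[k, k, b, b]]
            if (subgroup.length : Int) = qp then ([], st.2 ++ [subgroup])
            else (subgroup, st.2)
          else st) st) st) st
    = (l.flatMap (fun qp_set =>
        (PySem.List.pyRange (qp_set.getD 0 0) (qp_set.getD 1 0 + 1) 1).flatMap (fun k =>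
          ((PySem.List.pyRange (qp_set.getD 2 0) (qp_set.getD 3 0 + 1) 1).filter
              (fun b => decide (b ∈ co) || decide (co.headI = -1))).map
            (fun b => [k, k, b, b])))).foldl (pvPush qp) st := by
  rw [List.foldl_flatMap]
  apply List.foldl_ext
  intro st' qs _
  rw [List.foldl_flatMap]
  apply List.foldl_ext
  intro st'' k _
  rw [List.foldl_map, List.foldl_filter]
  apply List.foldl_ext
  intro st3 b _
  by_cases hb : b ∈ co ∨ co.headI = -1
  · have hb' : (decide (b ∈ co) || decide (co.headI = -1)) = true := by simpa using hb
    rw [hb']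
    simp only [if_true]
    rw [if_pos hb]
    rfl
  · have hb' : ¬ ((decide (b ∈ co) || decide (co.headI = -1)) = true) := by simpa using hb
    rw [if_neg hb, if_neg hb']

-- ===== VERDICT (by name: the statement is the Claim_ definition above) =====
theorem QP_list_merger_spec : Claim_equal_QP_list_merger := by
  intro l qp co _ hpre
  unfold Spec_QP_list_merger QP_list_merger QP_list_merger_alt
  simp only []
  rw [fold_eq_fold_flat]
  set flat := l.flatMap (fun qp_set =>
    (PySem.List.pyRange (qp_set.getD 0 0) (qp_set.getD 1 0 + 1) 1).flatMap (fun k =>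
      ((PySem.List.pyRange (qp_set.getD 2 0) (qp_set.getD 3 0 + 1) 1).filter
          (fun b => decide (b ∈ co) || decide (co.headI = -1))).map
        (fun b => [k, k, b, b]))) with hflat
  rcases lt_or_ge qp 1 with hqp | hqp
  · -- qp < 0 here (qp = 0 is outside Pre_): A never flushes and drops the tail; B's range is empty
    have hneg : qp < 0 := by
      rcases hpre with ⟨h0, -, -⟩
      omega
    rw [foldl_push_const qp hneg flat [] []]
    rw [pyRange_nonpos qp _ (Int.natCast_nonneg _) hneg]
    simp only [List.nil_append, List.map_nil]
    by_cases hf : flat = []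
    · simp [hf]
    · rw [if_neg]
      rintro ⟨h1, h2⟩
      have : 1 ≤ (flat.length : Int) := by
        have := List.length_pos_iff.mpr hf
        omega
      omega
  · rw [foldl_push_chunk qp hqp flat [] [] (by simp; omega)]
    rw [map_slice_chunk qp hqp flat.length flat le_rfl]
    simp
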